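-- pv_equiv track=rewrite | github.com/mishka251/stalker_op22_cyclic_quest_wiki | game_parser/management/commands/parse_scripts_function.py | _create_function_aliases
-- ===== SOURCE A (Python) =====
-- def _create_function_aliases(
--
--     function_name: str,
--     file_namespace: str,
-- ) -> list[str]:
--     name = function_name
--     names = [name]
--     namespace_parts = list(reversed(file_namespace.split(".")))
--     for part in namespace_parts:
--         name = f"{part}.{name}"
--         names.append(name)
--     return names
-- ===== SOURCE B (Python) =====
-- def _create_function_aliases(
--     function_name: str,
--     file_namespace: str,
-- ) -> list[str]:
--     parts = file_namespace.split(".")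
--     n = len(parts)
--     return [".".join(parts[n - i:] + [function_name]) for i in range(n + 1)]
-- ===== Notes on version B (the rewrite author's own statement) =====
-- stated objective: alternative
-- what changed: Replaces the accumulator loop that prepends each namespace part onto the previous alias with a single comprehension that builds each alias independently by joining a suffix slice of the split parts with the function name.
import Mathlib
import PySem

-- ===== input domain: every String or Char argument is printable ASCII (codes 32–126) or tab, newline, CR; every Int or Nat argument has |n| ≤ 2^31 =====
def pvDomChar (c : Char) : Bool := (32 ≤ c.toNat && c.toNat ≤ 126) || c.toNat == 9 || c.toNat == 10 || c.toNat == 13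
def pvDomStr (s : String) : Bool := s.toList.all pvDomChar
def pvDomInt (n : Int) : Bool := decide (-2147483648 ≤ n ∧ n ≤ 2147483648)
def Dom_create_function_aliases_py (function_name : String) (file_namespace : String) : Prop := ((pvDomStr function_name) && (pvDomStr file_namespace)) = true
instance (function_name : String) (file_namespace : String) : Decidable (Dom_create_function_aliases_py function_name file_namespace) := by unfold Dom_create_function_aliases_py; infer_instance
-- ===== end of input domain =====

-- B replaces A's accumulator loop (each alias prepends a part onto the previous one) by a
-- comprehension that builds every alias independently as a join of a suffix slice of the
-- split namespace parts with the function name (objective: alternative decomposition).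

-- ===== PORT A =====
def create_function_aliases_py (function_name : String) (file_namespace : String) : List String :=
  let name := function_name
  let names : List String := [name]
  -- list(reversed(file_namespace.split("."))) ; split? is some here since the separator "." is non-empty
  let namespace_parts : List String := ((PySem.Str.split? file_namespace ".").getD []).reverse
  (namespace_parts.foldl
    (fun (st : String × List String) part =>
      let name := part ++ "." ++ st.1      -- f"{part}.{name}"
      (name, st.2 ++ [name]))
    (name, names)).2

-- ===== PORT B =====
def create_function_aliases_py_alt (function_name : String) (file_namespace : String) : List String :=
  let parts : List String := ((PySem.Str.split? file_namespace ".").getD [])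
  let n : Int := parts.length
  (PySem.List.pyRange 0 (n + 1) 1).map
    (fun i => PySem.Str.join "." (PySem.List.slice parts (some (n - i)) none ++ [function_name]))

-- ===== PRECONDITION & SPEC =====
def Spec_create_function_aliases_py (function_name : String) (file_namespace : String) (out : List String) : Prop := out = create_function_aliases_py_alt function_name file_namespace
instance (function_name : String) (file_namespace : String) (out : List String) : Decidable (Spec_create_function_aliases_py function_name file_namespace out) := by unfold Spec_create_function_aliases_py; infer_instance

-- ===== CLAIM (what is proved, stated in full; the proofs are below) =====
def Claim_equal_create_function_aliases_py : Prop := ∀ (function_name : String) (file_namespace : String), Dom_create_function_aliases_py function_name file_namespace → Spec_create_function_aliases_py function_name file_namespace (create_function_aliases_py function_name file_namespace)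

-- ===== LEMMAS AND PROOFS =====

-- string-level corollaries of the PySem.Chars.join lemmas
lemma strJoin_singleton (sep x : String) : PySem.Str.join sep [x] = x := by
  have h : (PySem.Str.join sep [x]).toList = x.toList := by
    simp [PySem.Str.toList_join, PySem.Chars.join_singleton]
  exact String.toList_injective h

lemma strJoin_cons_cons (a b : String) (r : List String) :
    PySem.Str.join "." (a :: b :: r) = a ++ "." ++ PySem.Str.join "." (b :: r) := by
  have h : (PySem.Str.join "." (a :: b :: r)).toList = (a ++ "." ++ PySem.Str.join "." (b :: r)).toList := by
    simp [PySem.Str.toList_join, PySem.Chars.join_cons_cons]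
  exact String.toList_injective h

-- the final value of A's running variable `name` after the whole loop
def pvNm : List String → String → String
  | [], a => a
  | q :: t, a => pvNm t (q ++ "." ++ a)

-- the list of names A's loop appends, in order
def pvG : List String → String → List String
  | [], _ => []
  | q :: t, a => (q ++ "." ++ a) :: pvG t (q ++ "." ++ a)

lemma foldl_eq_nm_g (qs : List String) (acc : String) (names : List String) :
    qs.foldl
      (fun (st : String × List String) part =>
        (part ++ "." ++ st.1, st.2 ++ [part ++ "." ++ st.1]))
      (acc, names) = (pvNm qs acc, names ++ pvG qs acc) := by
  induction qs generalizing acc names with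
  | nil => simp [pvNm, pvG]
  | cons q t ih => simp [pvNm, pvG, List.foldl_cons, ih]

lemma nm_append (xs : List String) (p acc : String) :
    pvNm (xs ++ [p]) acc = p ++ "." ++ pvNm xs acc := by
  induction xs generalizing acc with
  | nil => simp [pvNm]
  | cons q t ih => simp [pvNm, ih]

lemma g_append (xs : List String) (p acc : String) :
    pvG (xs ++ [p]) acc = pvG xs acc ++ [p ++ "." ++ pvNm xs acc] := by
  induction xs generalizing acc with
  | nil => simp [pvNm, pvG]
  | cons q t ih => simp [pvNm, pvG, ih]

lemma nm_reverse_eq_join (t : List String) (fn : String) :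
    pvNm t.reverse fn = PySem.Str.join "." (t ++ [fn]) := by
  induction t generalizing fn with
  | nil => simp [pvNm, strJoin_singleton]
  | cons a t' ih =>
      have hne : t' ++ [fn] ≠ [] := by simp
      obtain ⟨b, r, hbr⟩ := List.exists_cons_of_ne_nil hne
      calc pvNm (a :: t').reverse fn
          = pvNm (t'.reverse ++ [a]) fn := by simp
        _ = a ++ "." ++ pvNm t'.reverse fn := nm_append _ _ _
        _ = a ++ "." ++ PySem.Str.join "." (t' ++ [fn]) := by rw [ih]
        _ = PySem.Str.join "." (a :: (t' ++ [fn])) := by rw [hbr, strJoin_cons_cons]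
        _ = PySem.Str.join "." ((a :: t') ++ [fn]) := by simp

-- A's whole output, as the list of suffix joins (the common form)
lemma main_eq (ps : List String) (fn : String) :
    fn :: pvG ps.reverse fn
      = (List.range (ps.length + 1)).map
          (fun k => PySem.Str.join "." (ps.drop (ps.length - k) ++ [fn])) := by
  induction ps with
  | nil => simp [pvG, strJoin_singleton]
  | cons p t ih =>
      have hR : (List.range ((p :: t).length + 1)).map
            (fun k => PySem.Str.join "." ((p :: t).drop ((p :: t).length - k) ++ [fn]))
          = (List.range (t.length + 1)).map
              (fun k => PySem.Str.join "." (t.drop (t.length - k) ++ [fn]))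
            ++ [PySem.Str.join "." ((p :: t) ++ [fn])] := by
        rw [List.range_succ, List.map_append]
        congr 1
        · apply List.map_congr_left
          intro k hk
          have hk' : k < t.length + 1 := List.mem_range.mp hk
          have hdrop : (p :: t).length - k = (t.length - k) + 1 := by
            simp only [List.length_cons]; omega
          rw [hdrop, List.drop_succ_cons]
        · simp
      calc fn :: pvG (p :: t).reverse fn
          = fn :: pvG (t.reverse ++ [p]) fn := by simp
        _ = fn :: (pvG t.reverse fn ++ [p ++ "." ++ pvNm t.reverse fn]) := by rw [g_append]
        _ = (fn :: pvG t.reverse fn) ++ [p ++ "." ++ pvNm t.reverse fn] := by simp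
        _ = (fn :: pvG t.reverse fn) ++ [PySem.Str.join "." ((p :: t) ++ [fn])] := by
              rw [nm_reverse_eq_join]
              have hne : t ++ [fn] ≠ [] := by simp
              obtain ⟨b, r, hbr⟩ := List.exists_cons_of_ne_nil hne
              rw [show (p :: t) ++ [fn] = p :: (t ++ [fn]) by simp, hbr, strJoin_cons_cons]
        _ = _ := by rw [ih, hR]

-- B's output, in the same common form
lemma alt_eq (fn fs : String) :
    create_function_aliases_py_alt fn fs
      = (List.range ((((PySem.Str.split? fs ".").getD []).length) + 1)).map
          (fun k => PySem.Str.join "."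
            ((((PySem.Str.split? fs ".").getD []).drop ((((PySem.Str.split? fs ".").getD []).length) - k)) ++ [fn])) := by
  simp only [create_function_aliases_py_alt]
  set ps := (PySem.Str.split? fs ".").getD [] with hps
  have hcast : ((ps.length : Int) + 1) = ((ps.length + 1 : Nat) : Int) := by push_cast; ring
  rw [hcast, PySem.List.pyRange_zero_natCast, List.map_map]
  apply List.map_congr_left
  intro k hk
  have hk' : k < ps.length + 1 := List.mem_range.mp hk
  have h1 : ((ps.length : Int) - (k : Int)) = ((ps.length - k : Nat) : Int) := by omega
  simp only [Function.comp_apply, h1, PySem.List.slice_from_natCast]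

-- ===== VERDICT (by name: the statement is the Claim_ definition above) =====
theorem create_function_aliases_py_spec : Claim_equal_create_function_aliases_py := by
  intro fn fs _
  unfold Spec_create_function_aliases_py
  unfold create_function_aliases_py
  rw [alt_eq]
  set ps := (PySem.Str.split? fs ".").getD [] with hps
  simp only [foldl_eq_nm_g]
  simpa using (main_eq ps fn)
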